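-- pv_equiv track=rewrite | github.com/himanshugupta825/WorkerNetwork | voice_search.py | filter_jobs_by_criteria
-- ===== SOURCE A (Python) =====
-- def filter_jobs_by_criteria(jobs, criteria):
--     """
--     Filter jobs based on extracted criteria
--
--     Args:
--         jobs (list): List of job dictionaries
--         criteria (dict): Search criteria from voice command
--
--     Returns:
--         list: Filtered list of jobs matching criteria
--     """
--     filtered_jobs = []
--
--     # If no criteria specified, return all jobs
--     if not any(criteria.values()):
--         return jobs
--
--     for job in jobs:
--         match = True
--
--         # Check job role match
--         if criteria.get("job_role") and criteria["job_role"].strip():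
--             if criteria["job_role"].lower() not in job["job_role"].lower():
--                 match = False
--
--         # Check location match
--         if criteria.get("location") and criteria["location"].strip():
--             if not job.get("location") or criteria["location"].lower() not in job["location"].lower():
--                 match = False
--
--         # Check payment match - this is more complex and could be improved
--         if criteria.get("payment") and criteria["payment"].strip():
--             if not job.get("payment") or criteria["payment"].lower() not in job["payment"].lower():
--                 match = False
--
--         # Check business type match
--         if criteria.get("business_type") and criteria["business_type"].strip():
--             if not job.get("business_name") or criteria["business_type"].lower() not in job["business_name"].lower():
--                 match = False
--
--         if match:
--             filtered_jobs.append(job)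
--
--     return filtered_jobs
-- ===== SOURCE B (Python) =====
-- def filter_jobs_by_criteria(jobs, criteria):
--     # No criteria specified: return all jobs (same object).
--     if not any(criteria.values()):
--         return jobs
--     # Staged narrowing: apply each active criterion as its own filtering pass
--     # over the surviving list (instead of testing all criteria per job).
--     result = jobs
--     if criteria.get("job_role") and criteria["job_role"].strip():
--         needle = criteria["job_role"].lower()
--         result = [j for j in result if needle in j["job_role"].lower()]
--     if criteria.get("location") and criteria["location"].strip():
--         needle = criteria["location"].lower()
--         result = [j for j in result if needle in j.get("location", "").lower()]
--     if criteria.get("payment") and criteria["payment"].strip():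
--         needle = criteria["payment"].lower()
--         result = [j for j in result if needle in j.get("payment", "").lower()]
--     if criteria.get("business_type") and criteria["business_type"].strip():
--         needle = criteria["business_type"].lower()
--         result = [j for j in result if needle in j.get("business_name", "").lower()]
--     return result
-- ===== Notes on version B (the rewrite author's own statement) =====
-- stated objective: alternative
-- what changed: A's single pass over jobs with a per-job match flag testing all four criteria is replaced by staged filtering: each active criterion runs its own pass that narrows the surviving list, and the three lenient fields are read via job.get(field, "").
import Mathlib
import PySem

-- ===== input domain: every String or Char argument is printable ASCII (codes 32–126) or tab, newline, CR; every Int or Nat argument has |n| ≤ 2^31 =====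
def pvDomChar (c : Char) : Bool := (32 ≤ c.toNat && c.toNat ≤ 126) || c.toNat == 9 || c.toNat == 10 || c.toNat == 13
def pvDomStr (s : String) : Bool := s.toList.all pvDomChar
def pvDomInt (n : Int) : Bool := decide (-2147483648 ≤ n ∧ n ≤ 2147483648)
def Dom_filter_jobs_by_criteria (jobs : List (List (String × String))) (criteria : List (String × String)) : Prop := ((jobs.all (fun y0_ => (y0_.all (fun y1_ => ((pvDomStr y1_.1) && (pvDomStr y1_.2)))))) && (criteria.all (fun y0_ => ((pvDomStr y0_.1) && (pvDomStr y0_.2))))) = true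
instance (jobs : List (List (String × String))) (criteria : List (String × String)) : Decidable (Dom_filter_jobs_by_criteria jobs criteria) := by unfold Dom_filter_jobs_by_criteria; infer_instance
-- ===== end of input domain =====

-- B replaces A's single pass with a per-job match flag by staged filtering passes,
-- one per active criterion, each narrowing the surviving list (alternative decomposition; same cost).
-- In the no-criteria case both return jobs unchanged.


-- shared helper: Python truthiness of `d.get(k)` (None and "" are falsy)
def pvTruthy (o : Option String) : Bool := match o with | some v => v ≠ "" | none => false

-- shared helper: `criteria.get(k) and criteria[k].strip()` as a boolean (both Pythons test this)
def pvActive (c : PySem.Dict String String) (k : String) : Bool :=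
  pvTruthy (c.get? k) && decide (PySem.Str.strip ((c.get? k).getD "") ≠ "")

-- ===== PORT A =====
-- the body of A's loop computing `match` for one job; `job["job_role"]` raises KeyError on a
-- missing key in Python — ported as `(get? …).getD ""`, exact on Pre_ which excludes that case
def pvMatchA (c : PySem.Dict String String) (j : PySem.Dict String String) : Bool :=
  let m := true
  let m := if pvActive c "job_role" then
      (if !(PySem.Str.isIn (PySem.Str.lower ((c.get? "job_role").getD ""))
              (PySem.Str.lower ((j.get? "job_role").getD ""))) then false else m)
    else m
  let m := if pvActive c "location" then
      (if !(pvTruthy (j.get? "location")) ||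
          !(PySem.Str.isIn (PySem.Str.lower ((c.get? "location").getD ""))
              (PySem.Str.lower ((j.get? "location").getD ""))) then false else m)
    else m
  let m := if pvActive c "payment" then
      (if !(pvTruthy (j.get? "payment")) ||
          !(PySem.Str.isIn (PySem.Str.lower ((c.get? "payment").getD ""))
              (PySem.Str.lower ((j.get? "payment").getD ""))) then false else m)
    else m
  let m := if pvActive c "business_type" then
      (if !(pvTruthy (j.get? "business_name")) ||
          !(PySem.Str.isIn (PySem.Str.lower ((c.get? "business_type").getD ""))
              (PySem.Str.lower ((j.get? "business_name").getD ""))) then false else m)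
    else m
  m

def filter_jobs_by_criteria (jobs : List (List (String × String))) (criteria : List (String × String)) : List (List (String × String)) :=
  let c := PySem.Dict.ofList criteria
  if !((PySem.Dict.values c).any (fun v => decide (v ≠ ""))) then jobs
  else jobs.foldl (fun acc job => if pvMatchA c (PySem.Dict.ofList job) then acc ++ [job] else acc) []

-- ===== PORT B =====
-- one staged pass: keep the jobs whose `field` (read as j.get(field, "")) contains the needle;
-- j["job_role"] in B's first pass is strict in Python — ported as getD "", exact on Pre_
def pvPass (needle field : String) (r : List (List (String × String))) : List (List (String × String)) :=
  r.filter (fun j => PySem.Str.isIn needle (PySem.Str.lower ((PySem.Dict.ofList j).getD field "")))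

def filter_jobs_by_criteria_alt (jobs : List (List (String × String))) (criteria : List (String × String)) : List (List (String × String)) :=
  let c := PySem.Dict.ofList criteria
  if !((PySem.Dict.values c).any (fun v => decide (v ≠ ""))) then jobs
  else
    let r := jobs
    let r := if pvActive c "job_role" then
        pvPass (PySem.Str.lower ((c.get? "job_role").getD "")) "job_role" r else r
    let r := if pvActive c "location" then
        pvPass (PySem.Str.lower ((c.get? "location").getD "")) "location" r else r
    let r := if pvActive c "payment" then
        pvPass (PySem.Str.lower ((c.get? "payment").getD "")) "payment" r else r
    let r := if pvActive c "business_type" then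
        pvPass (PySem.Str.lower ((c.get? "business_type").getD "")) "business_name" r else r
    r

-- ===== PRECONDITION & SPEC =====
-- Pre_ excludes exactly the inputs where Python A raises KeyError: a job_role criterion is
-- active but some job has no "job_role" key (job["job_role"] is a strict access; B's first
-- pass raises there too).
def Pre_filter_jobs_by_criteria (jobs : List (List (String × String))) (criteria : List (String × String)) : Prop :=
  pvActive (PySem.Dict.ofList criteria) "job_role" = true →
    ∀ job ∈ jobs, "job_role" ∈ job.map Prod.fst
instance (jobs : List (List (String × String))) (criteria : List (String × String)) : Decidable (Pre_filter_jobs_by_criteria jobs criteria) := by unfold Pre_filter_jobs_by_criteria; infer_instance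

def pvWitness_filter_jobs_by_criteria : (List (List (String × String))) × (List (String × String)) :=
  ([[("job_role", "Cook"), ("location", "Delhi")], [("job_role", "Driver")]],
   [("job_role", "cook"), ("location", "")])

def Spec_filter_jobs_by_criteria (jobs : List (List (String × String))) (criteria : List (String × String)) (out : List (List (String × String))) : Prop := out = filter_jobs_by_criteria_alt jobs criteria
instance (jobs : List (List (String × String))) (criteria : List (String × String)) (out : List (List (String × String))) : Decidable (Spec_filter_jobs_by_criteria jobs criteria out) := by unfold Spec_filter_jobs_by_criteria; infer_instance

-- ===== CLAIM (what is proved, stated in full; the proofs are below) =====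
def Claim_equal_filter_jobs_by_criteria : Prop := ∀ (jobs : List (List (String × String))) (criteria : List (String × String)), Dom_filter_jobs_by_criteria jobs criteria → Pre_filter_jobs_by_criteria jobs criteria → Spec_filter_jobs_by_criteria jobs criteria (filter_jobs_by_criteria jobs criteria)

-- ===== LEMMAS AND PROOFS =====
lemma pv_lower_ne_empty {s : String} (h : s ≠ "") : PySem.Str.lower s ≠ "" := by
  intro hc
  have := congrArg String.toList hc
  rw [PySem.Str.toList_lower] at this
  simp [PySem.Chars.lower, String.toList_eq_nil_iff] at this
  exact h this

-- a falsy job field makes B's containment test false by itself (the needle is non-empty),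
-- so A's extra truthiness conjunct is absorbed
lemma pv_truthy_absorb (needle : List Char) (g : Option String) (hn : needle ≠ []) :
    (pvTruthy g && PySem.Chars.isIn needle (PySem.Chars.lower (g.getD "").toList))
      = PySem.Chars.isIn needle (PySem.Chars.lower (g.getD "").toList) := by
  have hnil : PySem.Chars.isIn needle (PySem.Chars.lower ([] : List Char)) = false := by
    rw [PySem.Chars.isIn_eq_false_iff]
    simp [PySem.Chars.lower, hn]
  cases g with
  | none => simp [pvTruthy, hnil]
  | some v =>
      by_cases hv : v = ""
      · subst hv; simp [pvTruthy, hnil]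
      · simp [pvTruthy, hv]

set_option maxHeartbeats 2000000 in
lemma pv_match_eq (c j : PySem.Dict String String) :
    pvMatchA c j =
      ((!pvActive c "job_role" || PySem.Str.isIn (PySem.Str.lower ((c.get? "job_role").getD "")) (PySem.Str.lower (j.getD "job_role" ""))) &&
       (!pvActive c "location" || PySem.Str.isIn (PySem.Str.lower ((c.get? "location").getD "")) (PySem.Str.lower (j.getD "location" ""))) &&
       (!pvActive c "payment" || PySem.Str.isIn (PySem.Str.lower ((c.get? "payment").getD "")) (PySem.Str.lower (j.getD "payment" ""))) &&
       (!pvActive c "business_type" || PySem.Str.isIn (PySem.Str.lower ((c.get? "business_type").getD "")) (PySem.Str.lower (j.getD "business_name" "")))) := by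
  have needle_ne' : ∀ k : String, pvActive c k = true →
      PySem.Chars.lower ((c.get? k).getD "").toList ≠ [] := by
    intro k hk
    have : PySem.Str.lower ((c.get? k).getD "") ≠ "" := by
      apply pv_lower_ne_empty
      unfold pvActive pvTruthy at hk
      cases hg : c.get? k with
      | none => rw [hg] at hk; simp at hk
      | some v => rw [hg] at hk; simp at hk; simpa [hg] using hk.1
    intro hc
    apply this
    rw [← String.toList_eq_nil_iff, PySem.Str.toList_lower]
    exact hc
  unfold pvMatchA
  cases h1 : pvActive c "job_role" <;>
  cases h2 : pvActive c "location" <;>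
  cases h3 : pvActive c "payment" <;>
  cases h4 : pvActive c "business_type" <;>
  simp only [Bool.false_eq_true, if_false, if_true, Bool.not_false,
    Bool.not_true, Bool.false_or, Bool.true_or, Bool.true_and, Bool.and_true,
    PySem.Dict.getD_eq_get?_getD] <;>
  first
  | rfl
  | simp [pv_truthy_absorb, needle_ne', h2, h3, h4,
      Bool.and_comm, Bool.and_assoc]

-- a guarded staged pass, rewritten as a filter by a guarded predicate
lemma pv_guard_pass (b : Bool) (needle field : String) (r : List (List (String × String))) :
    (if b then pvPass needle field r else r)
      = r.filter (fun j => !b || PySem.Str.isIn needle (PySem.Str.lower ((PySem.Dict.ofList j).getD field ""))) := by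
  cases b with
  | false => simp
  | true => simp [pvPass]

-- ===== VERDICT (by name: the statement is the Claim_ definition above) =====
theorem filter_jobs_by_criteria_spec : Claim_equal_filter_jobs_by_criteria := by
  intro jobs criteria _ _
  unfold Spec_filter_jobs_by_criteria filter_jobs_by_criteria filter_jobs_by_criteria_alt
  cases h : ((PySem.Dict.values (PySem.Dict.ofList criteria)).any (fun v => decide (v ≠ ""))) with
  | false => simp only [h, Bool.not_false, if_true]
  | true =>
      simp only [h, Bool.not_true, Bool.false_eq_true, if_false]
      rw [PySem.List.foldl_append_if_eq_filter, List.nil_append]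
      simp only [pv_guard_pass, List.filter_filter]
      apply List.filter_congr
      intro job _
      rw [pv_match_eq]
      ac_rfl
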